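-- pv_equiv track=rewrite | github.com/inbn6619/algorithm | 코딩테스트 고득점/해시/의상.py | solution
-- ===== SOURCE A (Python) =====
-- def solution(clothes):
--     clothdict = dict()
--     answer = 1
--
--     for key in clothes:
--         clothdict[key[-1]] = 0
--
--     for value in clothes:
--         clothdict[value[-1]] += len(value[:-1])
--
--     for val in clothdict.values():
--         answer = (val + 1) * answer
--
--     return answer
-- ===== SOURCE B (Python) =====
-- def solution(clothes):
--     # B: collect distinct categories in first-occurrence order, then for each
--     # category scan clothes summing len(item)-1, multiplying the answer directly
--     # (no dict accumulator).
--     cats = []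
--     for item in clothes:
--         c = item[-1]
--         if c not in cats:
--             cats.append(c)
--     answer = 1
--     for c in cats:
--         weight = 0
--         for item in clothes:
--             if item[-1] == c:
--                 weight += len(item) - 1
--         answer *= weight + 1
--     return answer
-- ===== Notes on version B (the rewrite author's own statement) =====
-- stated objective: alternative
-- what changed: Replaces A's dict-based accumulation (two dict-building passes plus a values pass) with a distinct-category list followed by a per-category rescan of the input that sums len(item)-1 and multiplies the running answer directly, so no dict is built at all.
-- outside the precondition, e.g. on solution([[]]): A raises IndexError, B raises IndexError
import Mathlib
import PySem

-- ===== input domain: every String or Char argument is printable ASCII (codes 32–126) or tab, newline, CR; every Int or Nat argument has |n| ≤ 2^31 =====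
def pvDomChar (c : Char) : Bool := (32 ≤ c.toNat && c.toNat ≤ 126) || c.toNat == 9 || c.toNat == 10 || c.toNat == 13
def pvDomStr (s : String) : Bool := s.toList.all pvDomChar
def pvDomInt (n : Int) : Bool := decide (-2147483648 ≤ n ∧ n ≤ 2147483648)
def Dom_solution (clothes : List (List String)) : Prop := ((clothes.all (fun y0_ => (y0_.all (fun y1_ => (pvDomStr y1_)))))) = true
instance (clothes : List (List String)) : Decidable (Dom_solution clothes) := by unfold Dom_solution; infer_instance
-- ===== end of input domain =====

-- B replaces A's dict accumulation with a distinct-category list plus a per-category rescan; equal return value on Pre_ (alternative decomposition, no speed claim).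


-- ===== PORT A =====
-- item[-1] (IndexError on an empty inner list is excluded by Pre_)
def pvKey (it : List String) : String := PySem.List.pyGetD it (-1) ""
-- len(value[:-1])
def pvW (it : List String) : Int := ((PySem.List.slice it none (some (-1))).length : Int)

def solution (clothes : List (List String)) : Int :=
  let d0 : PySem.Dict String Int :=
    clothes.foldl (fun d it => d.insert (pvKey it) 0) PySem.Dict.empty
  let d1 : PySem.Dict String Int :=
    clothes.foldl (fun d it =>
      d.modify (pvKey it) 0 (· + pvW it)) d0
  d1.values.foldl (fun answer v => (v + 1) * answer) 1

-- ===== PORT B =====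
def solution_alt (clothes : List (List String)) : Int :=
  let cats : PySem.Set String :=
    clothes.foldl (fun s it => PySem.Set.add s (pvKey it)) PySem.Set.empty
  cats.foldl (fun answer c =>
    answer * (clothes.foldl (fun w it =>
      if pvKey it == c then w + ((it.length : Int) - 1) else w) 0 + 1)) 1

-- ===== PRECONDITION & SPEC =====
-- Pre_ excludes inputs containing an empty inner list, on which A raises IndexError at item[-1].
def Pre_solution (clothes : List (List String)) : Prop := ∀ it ∈ clothes, it ≠ []
instance (clothes : List (List String)) : Decidable (Pre_solution clothes) := by unfold Pre_solution; infer_instance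
def pvWitness_solution : List (List String) := [["a", "X"], ["b", "X"], ["c", "Y"]]
def Spec_solution (clothes : List (List String)) (out : Int) : Prop := out = solution_alt clothes
instance (clothes : List (List String)) (out : Int) : Decidable (Spec_solution clothes out) := by unfold Spec_solution; infer_instance

-- ===== CLAIM (what is proved, stated in full; the proofs are below) =====
def Claim_equal_solution : Prop := ∀ (clothes : List (List String)), Dom_solution clothes → Pre_solution clothes → Spec_solution clothes (solution clothes)

-- ===== LEMMAS AND PROOFS =====

theorem pvW_eq (it : List String) (h : it ≠ []) : pvW it = (it.length : Int) - 1 := by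
  unfold pvW
  rw [PySem.List.slice_to_neg_one]
  have : it.length ≠ 0 := by simpa using h
  simp [List.length_dropLast]
  omega

-- A's first loop leaves every value at 0
theorem getD_d0 (clothes : List (List String)) (d : PySem.Dict String Int)
    (h : ∀ c, d.getD c 0 = 0) (c : String) :
    (clothes.foldl (fun d it => d.insert (pvKey it) 0) d).getD c 0 = 0 := by
  induction clothes generalizing d with
  | nil => exact h c
  | cons x xs ih =>
      simp only [List.foldl_cons]
      apply ih
      intro c'
      rw [PySem.Dict.getD_insert]
      split <;> simp [h]

-- pulling the accumulator out of B's inner conditional-sum fold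
theorem pvShift (c : String) (xs : List (List String)) (a : Int) :
    xs.foldl (fun w it => if pvKey it == c then w + pvW it else w) a
      = a + xs.foldl (fun w it => if pvKey it == c then w + pvW it else w) 0 := by
  induction xs generalizing a with
  | nil => simp
  | cons y ys ih =>
      simp only [List.foldl_cons]
      rw [ih, ih (if pvKey y == c then 0 + pvW y else 0)]
      split <;> ring

-- A's second loop: getD is the initial value plus the sum of weights of matching items
theorem getD_d1 (clothes : List (List String)) (d : PySem.Dict String Int) (c : String) :
    (clothes.foldl (fun d it => d.modify (pvKey it) 0 (· + pvW it)) d).getD c 0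
      = d.getD c 0 + clothes.foldl (fun w it => if pvKey it == c then w + pvW it else w) 0 := by
  induction clothes generalizing d with
  | nil => simp
  | cons x xs ih =>
      simp only [List.foldl_cons]
      rw [ih, PySem.Dict.getD_modify,
        pvShift c xs (if (pvKey x == c) = true then 0 + pvW x else 0)]
      by_cases hc : c = pvKey x
      · have hb : (pvKey x == c) = true := by simp [hc]
        rw [if_pos hc, if_pos hb, hc]
        ring
      · have hb : (pvKey x == c) = false := by simp; exact fun h => hc h.symm
        rw [if_neg hc, if_neg (by simp [hb])]
        ring

-- updating a set with elements it already has changes nothing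
theorem update_self (l : List String) :
    PySem.Set.update (PySem.Set.ofList l) l = PySem.Set.ofList l := by
  rw [PySem.Set.update_eq_append_filter]
  have h : List.filter (fun y => !(PySem.Set.ofList l).contains y) (PySem.Set.ofList l) = [] := by
    apply List.filter_eq_nil_iff.mpr
    intro y hy
    have hyl : y ∈ l := (PySem.Set.mem_ofList l y).mp hy
    simp [hyl]
  rw [h, List.append_nil]

-- the two fold shapes for the final product agree
theorem prod_fold (l : List Int) (i : Int) :
    l.foldl (fun answer v => (v + 1) * answer) i = l.foldl (fun answer v => answer * (v + 1)) i := by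
  induction l generalizing i with
  | nil => rfl
  | cons x xs ih => simp only [List.foldl_cons]; rw [ih, mul_comm]

theorem solution_eq (clothes : List (List String)) (hpre : Pre_solution clothes) :
    solution clothes = solution_alt clothes := by
  unfold solution solution_alt
  dsimp only
  have hd0keys : (clothes.foldl (fun d it => d.insert (pvKey it) 0) (PySem.Dict.empty : PySem.Dict String Int)).keys
      = PySem.Set.ofList (clothes.map pvKey) := by
    rw [PySem.Dict.keys_foldl_insert_key, PySem.Dict.keys_empty, PySem.Set.update_nil_left]
  have hd1keys : (clothes.foldl (fun d it => d.modify (pvKey it) 0 (· + pvW it))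
      (clothes.foldl (fun d it => d.insert (pvKey it) 0) (PySem.Dict.empty : PySem.Dict String Int))).keys
      = PySem.Set.ofList (clothes.map pvKey) := by
    rw [PySem.Dict.keys_foldl_modify_key, hd0keys]
    exact update_self _
  have hnodup : (clothes.foldl (fun d it => d.modify (pvKey it) 0 (· + pvW it))
      (clothes.foldl (fun d it => d.insert (pvKey it) 0) (PySem.Dict.empty : PySem.Dict String Int))).keys.Nodup := by
    rw [hd1keys]; exact PySem.Set.nodup_ofList _
  have hcats : clothes.foldl (fun s it => PySem.Set.add s (pvKey it)) PySem.Set.empty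
      = PySem.Set.ofList (clothes.map pvKey) := by
    rw [← PySem.Set.update_map_eq_foldl_add]
    exact PySem.Set.update_nil_left _
  rw [PySem.Dict.values_eq_map_keys _ hnodup 0, hd1keys, hcats, prod_fold, List.foldl_map]
  apply PySem.List.foldl_congr_mem
  intro acc c hc
  rw [getD_d1, getD_d0 _ _ (fun c => PySem.Dict.getD_empty c 0) c, zero_add]
  congr 1
  congr 1
  apply PySem.List.foldl_congr_mem
  intro w it hit
  rw [pvW_eq it (hpre it hit)]

-- ===== VERDICT (by name: the statement is the Claim_ definition above) =====
theorem solution_spec : Claim_equal_solution := by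
  intro clothes _ hpre
  unfold Spec_solution
  exact solution_eq clothes hpre
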